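-- pv_equiv track=rewrite | github.com/sueszli/vector-database-benchmark | dataset/python-mutated/iterables.py | permute_signs
-- ===== SOURCE A (Python) =====
-- from itertools import chain, combinations, combinations_with_replacement, cycle, islice, permutations, product, groupby
--
-- def permute_signs(t):
--     if False:
--         i = 10
--         return i + 15
--     'Return iterator in which the signs of non-zero elements\n    of t are permuted.\n\n    Examples\n    ========\n\n    >>> from sympy.utilities.iterables import permute_signs\n    >>> list(permute_signs((0, 1, 2)))\n    [(0, 1, 2), (0, -1, 2), (0, 1, -2), (0, -1, -2)]\n    '
--     for signs in product(*[(1, -1)] * (len(t) - t.count(0))):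
--         signs = list(signs)
--         yield type(t)([i * signs.pop() if i else i for i in t])
-- ===== SOURCE B (Python) =====
-- def permute_signs(t):
--     # recursive doubling over the structure of t: the sign-variants of t are built
--     # from the sign-variants of its tail, with the head's sign branching innermost
--     # (so the first nonzero element varies fastest, as in the original).
--     def go(xs):
--         if not xs:
--             yield []
--             return
--         x = xs[0]
--         for r in go(xs[1:]):
--             if x:
--                 yield [x] + r
--                 yield [-x] + r
--             else:
--                 yield [x] + r
--     for row in go(list(t)):
--         yield type(t)(row)
-- ===== Notes on version B (the rewrite author's own statement) =====
-- stated objective: alternative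
-- what changed: Replaces the flat 2^k enumeration of sign vectors (itertools.product plus a mutating signs.pop() per element) by a recursive-doubling generator over the structure of t: the sign variants of t are built from the variants of its tail, branching the head's sign innermost, so no sign vectors are ever materialised or consumed.
import Mathlib
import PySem

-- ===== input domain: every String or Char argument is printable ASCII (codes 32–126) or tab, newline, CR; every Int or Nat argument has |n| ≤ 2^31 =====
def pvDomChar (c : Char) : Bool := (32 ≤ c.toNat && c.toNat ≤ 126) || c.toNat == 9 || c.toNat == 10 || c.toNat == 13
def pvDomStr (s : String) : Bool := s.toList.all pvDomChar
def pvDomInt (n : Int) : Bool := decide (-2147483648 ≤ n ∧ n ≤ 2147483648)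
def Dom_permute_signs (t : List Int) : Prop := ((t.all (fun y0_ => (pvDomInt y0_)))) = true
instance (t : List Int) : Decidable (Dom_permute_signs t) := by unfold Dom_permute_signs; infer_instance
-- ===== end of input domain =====

-- B replaces the flat 2^k itertools.product enumeration with pop()-mutation by a
-- recursive-doubling generator over the structure of t (alternative decomposition; same output order).

-- ===== PORT A =====
-- product(*[(1, -1)] * k): first component varies slowest, exactly as itertools.product.
def pvProdSigns : Nat → List (List Int)
  | 0 => [[]]
  | k + 1 => ([1, -1] : List Int).flatMap (fun s => (pvProdSigns k).map (s :: ·))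

-- [i * signs.pop() if i else i for i in t], mutating signs.  The `none` branch of pop?
-- (empty signs list) is unreachable: signs always holds one sign per nonzero element of t
-- (Python would raise IndexError there); we emit i * 1 on that dead branch.
def pvRowA : List Int → List Int → List Int
  | [], _ => []
  | i :: rest, signs =>
    if i ≠ 0 then
      match PySem.List.pop? signs (-1) with
      | some (v, signs') => i * v :: pvRowA rest signs'
      | none => i * 1 :: pvRowA rest signs
    else i :: pvRowA rest signs

def permute_signs (t : List Int) : List (List Int) :=
  (pvProdSigns (t.length - PySem.List.count t 0)).map (fun signs => pvRowA t signs)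

-- ===== PORT B =====
-- Source B's inner generator go: variants of xs from variants of its tail, head sign innermost.
def pvGoB : List Int → List (List Int)
  | [] => [[]]
  | x :: rest => (pvGoB rest).flatMap (fun r => if x ≠ 0 then [x :: r, (-x) :: r] else [x :: r])

-- outer loop: type(t)(row) is the identity on lists.
def permute_signs_alt (t : List Int) : List (List Int) :=
  (pvGoB t).map (fun row => row)

-- ===== PRECONDITION & SPEC =====
def Spec_permute_signs (t : List Int) (out : List (List Int)) : Prop := out = permute_signs_alt t
instance (t : List Int) (out : List (List Int)) : Decidable (Spec_permute_signs t out) := by unfold Spec_permute_signs; infer_instance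

-- ===== CLAIM (what is proved, stated in full; the proofs are below) =====
def Claim_equal_permute_signs : Prop := ∀ (t : List Int), Dom_permute_signs t → Spec_permute_signs t (permute_signs t)

-- ===== LEMMAS AND PROOFS =====

-- signs of the low m bits of c, least significant first
def pvNatBits : Nat → Nat → List Int
  | 0, _ => []
  | m + 1, c => (if c % 2 = 1 then (-1 : Int) else 1) :: pvNatBits m (c / 2)

-- common reference: consume signs from the front at each nonzero element
def pvRowC : List Int → List Int → List Int
  | [], _ => []
  | i :: rest, s =>
    if i ≠ 0 then i * s.headD 1 :: pvRowC rest s.tail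
    else i :: pvRowC rest s

-- number of nonzero elements of t
def pvNz (t : List Int) : Nat := t.countP (fun x => x ≠ 0)

theorem pvRowA_reverse (t : List Int) : ∀ s : List Int, pvRowC t s = pvRowA t s.reverse := by
  induction t with
  | nil => intro s; rfl
  | cons i rest ih =>
    intro s
    by_cases hi : i = 0
    · simp [pvRowC, pvRowA, hi, ih]
    · cases s with
      | nil => simp [pvRowC, pvRowA, hi, PySem.List.pop?, ih]
      | cons a s' =>
        have : (a :: s').reverse = s'.reverse ++ [a] := by simp
        simp only [pvRowC, pvRowA, this, hi, PySem.List.pop?_last, ne_eq,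
          not_false_iff, if_pos, List.headD, List.tail, ih]

theorem pvNatBits_snoc (m : Nat) : ∀ c : Nat,
    pvNatBits (m + 1) c = pvNatBits m c ++ [if (c / 2 ^ m) % 2 = 1 then (-1 : Int) else 1] := by
  induction m with
  | zero => intro c; simp [pvNatBits]
  | succ m ih =>
    intro c
    have h2 : c / 2 / 2 ^ m = c / 2 ^ (m + 1) := by
      rw [Nat.div_div_eq_div_mul, pow_succ']
    calc pvNatBits (m + 1 + 1) c
        = (if c % 2 = 1 then (-1 : Int) else 1) :: pvNatBits (m + 1) (c / 2) := rfl
      _ = (if c % 2 = 1 then (-1 : Int) else 1) ::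
            (pvNatBits m (c / 2) ++ [if (c / 2 / 2 ^ m) % 2 = 1 then (-1 : Int) else 1]) := by
            rw [ih]
      _ = pvNatBits (m + 1) c ++ [if (c / 2 ^ (m + 1)) % 2 = 1 then (-1 : Int) else 1] := by
            rw [h2]; rfl

theorem pvNatBits_add_pow (m : Nat) : ∀ c : Nat, pvNatBits m (c + 2 ^ m) = pvNatBits m c := by
  induction m with
  | zero => intro c; rfl
  | succ m ih =>
    intro c
    have h1 : (c + 2 ^ (m + 1)) % 2 = c % 2 := by
      have : 2 ^ (m + 1) = 2 ^ m * 2 := pow_succ 2 m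
      omega
    have h2 : (c + 2 ^ (m + 1)) / 2 = c / 2 + 2 ^ m := by
      have : 2 ^ (m + 1) = 2 ^ m * 2 := pow_succ 2 m
      omega
    simp only [pvNatBits, h1, h2, ih]

theorem pvProdSigns_eq (k : Nat) :
    pvProdSigns k = (List.range (2 ^ k)).map (fun n => (pvNatBits k n).reverse) := by
  induction k with
  | zero => rfl
  | succ k ih =>
    have hsplit : (2 : Nat) ^ (k + 1) = 2 ^ k + 2 ^ k := by ring
    rw [pvProdSigns, ih, hsplit, List.range_add]
    simp only [List.flatMap_cons, List.flatMap_nil, List.map_map, List.map_append,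
      List.append_nil]
    congr 1
    · apply List.map_congr_left
      intro n hn
      have hn' : n < 2 ^ k := List.mem_range.mp hn
      have : n / 2 ^ k = 0 := Nat.div_eq_of_lt hn'
      simp [Function.comp, pvNatBits_snoc, this]
    · apply List.map_congr_left
      intro n hn
      have hn' : n < 2 ^ k := List.mem_range.mp hn
      have hd : (2 ^ k + n) / 2 ^ k = 1 := by
        rw [Nat.add_div_left _ (Nat.two_pow_pos k),
          Nat.div_eq_of_lt hn']
      have hb : pvNatBits k (2 ^ k + n) = pvNatBits k n := by
        rw [Nat.add_comm, pvNatBits_add_pow]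
      simp [Function.comp, pvNatBits_snoc, hd, hb]

theorem pvCount_le (t : List Int) : PySem.List.count t 0 ≤ t.length := by
  rw [PySem.List.count_eq]
  exact List.count_le_length

theorem pvNz_eq (t : List Int) :
    pvNz t + List.count 0 t = t.length := by
  induction t with
  | nil => rfl
  | cons i rest ih =>
    unfold pvNz at *
    by_cases hi : i = 0 <;> simp [hi] at ih ⊢ <;> omega

-- range(2*N) mapped equals pairs (2q, 2q+1) flat-mapped over range(N)
theorem pvRange_double {α : Type} (f : Nat → α) :
    ∀ N : Nat, (List.range (2 * N)).map f
      = (List.range N).flatMap (fun q => [f (2 * q), f (2 * q + 1)]) := by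
  intro N
  induction N with
  | zero => rfl
  | succ N ih =>
    have h2 : 2 * (N + 1) = 2 * N + 1 + 1 := by ring
    rw [h2, List.range_succ, List.range_succ, List.range_succ]
    simp only [List.map_append, List.flatMap_append, ih, List.map_cons, List.map_nil,
      List.flatMap_cons, List.flatMap_nil, List.append_assoc]
    rfl

-- main bridge: A's flat enumeration, read through pvRowC, is B's recursive doubling
theorem pvMain (t : List Int) :
    (List.range (2 ^ pvNz t)).map (fun n => pvRowC t (pvNatBits (pvNz t) n)) = pvGoB t := by
  induction t with
  | nil => rfl
  | cons i rest ih =>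
    by_cases hi : i = 0
    · have hk : pvNz (i :: rest) = pvNz rest := by simp [pvNz, hi]
      have hrow : ∀ s, pvRowC (i :: rest) s = i :: pvRowC rest s := by
        intro s; simp [pvRowC, hi]
      rw [hk]
      calc (List.range (2 ^ pvNz rest)).map
              (fun n => pvRowC (i :: rest) (pvNatBits (pvNz rest) n))
          = (List.range (2 ^ pvNz rest)).map
              (fun n => i :: pvRowC rest (pvNatBits (pvNz rest) n)) := by
            simp only [hrow]
        _ = ((List.range (2 ^ pvNz rest)).map
              (fun n => pvRowC rest (pvNatBits (pvNz rest) n))).map (i :: ·) := by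
            rw [List.map_map]; rfl
        _ = (pvGoB rest).map (i :: ·) := by rw [ih]
        _ = pvGoB (i :: rest) := by
            subst hi
            rw [pvGoB]
            generalize pvGoB rest = L
            induction L with
            | nil => rfl
            | cons a L ihL =>
              rw [List.map_cons, List.flatMap_cons, if_neg (by decide), ihL]
              rfl
    · have hk : pvNz (i :: rest) = pvNz rest + 1 := by simp [pvNz, hi]
      have hpow : (2 : Nat) ^ (pvNz rest + 1) = 2 * 2 ^ pvNz rest := by ring
      rw [hk, hpow, pvRange_double]
      have hstep : ∀ q : Nat,
          [pvRowC (i :: rest) (pvNatBits (pvNz rest + 1) (2 * q)),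
           pvRowC (i :: rest) (pvNatBits (pvNz rest + 1) (2 * q + 1))]
          = (fun r => if i ≠ 0 then [i :: r, (-i) :: r] else [i :: r])
              (pvRowC rest (pvNatBits (pvNz rest) q)) := by
        intro q
        have hm0 : (2 * q) % 2 = 0 := by omega
        have hd0 : (2 * q) / 2 = q := by omega
        have hm1 : (2 * q + 1) % 2 = 1 := by omega
        have hd1 : (2 * q + 1) / 2 = q := by omega
        simp [pvNatBits, pvRowC, hi, hm0, hd0, hm1, hd1]
      calc (List.range (2 ^ pvNz rest)).flatMap
              (fun q => [pvRowC (i :: rest) (pvNatBits (pvNz rest + 1) (2 * q)),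
                         pvRowC (i :: rest) (pvNatBits (pvNz rest + 1) (2 * q + 1))])
          = (List.range (2 ^ pvNz rest)).flatMap
              (fun q => (fun r => if i ≠ 0 then [i :: r, (-i) :: r] else [i :: r])
                (pvRowC rest (pvNatBits (pvNz rest) q))) := by
            simp only [hstep]
        _ = ((List.range (2 ^ pvNz rest)).map
              (fun q => pvRowC rest (pvNatBits (pvNz rest) q))).flatMap
              (fun r => if i ≠ 0 then [i :: r, (-i) :: r] else [i :: r]) := by
            rw [List.flatMap_map]
        _ = pvGoB (i :: rest) := by rw [ih]; rfl

-- ===== VERDICT (by name: the statement is the Claim_ definition above) =====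
theorem permute_signs_spec : Claim_equal_permute_signs := by
  intro t _
  unfold Spec_permute_signs permute_signs permute_signs_alt
  have hk : t.length - PySem.List.count t 0 = pvNz t := by
    have := pvNz_eq t
    have := pvCount_le t
    rw [PySem.List.count_eq] at *
    omega
  rw [hk, pvProdSigns_eq, List.map_map, List.map_id']
  rw [← pvMain t]
  apply List.map_congr_left
  intro n _
  exact (pvRowA_reverse t _).symm
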